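-- pv_equiv track=rewrite | github.com/AI4Finance-Foundation/RLSolver | rlsolver/MaxCut_H2O.py | bin_int_to_str
-- ===== SOURCE A (Python) =====
-- def bin_int_to_str(decimal: bin):
--     base_digits = "0123456789ABCDEFGHIJKLMNOPQRSTUVWXYZabcdefghijklmnopqrstuvwxyz_$"
--     base_num = len(base_digits)
--     if decimal == 0:
--         return base_digits[0]
--
--     base = ""
--     while decimal > 0:
--         remainder = decimal % base_num
--         base = base_digits[remainder] + base
--         decimal //= base_num
--     return base
-- ===== SOURCE B (Python) =====
-- def bin_int_to_str(decimal: bin):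
--     base_digits = "0123456789ABCDEFGHIJKLMNOPQRSTUVWXYZabcdefghijklmnopqrstuvwxyz_$"
--     base_num = len(base_digits)
--     if decimal == 0:
--         return base_digits[0]
--     n = 0
--     v = decimal
--     while v > 0:
--         n += 1
--         v //= base_num
--     out = []
--     for k in range(n - 1, -1, -1):
--         out.append(base_digits[(decimal // base_num ** k) % base_num])
--     return "".join(out)
-- ===== Notes on version B (the rewrite author's own statement) =====
-- stated objective: alternative
-- what changed: Replaced A's while-loop that prepends least-significant digits onto an accumulator string with a two-phase algorithm: first count the digits, then emit each digit most-significant-first by dividing by decreasing powers of the base.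
import Mathlib
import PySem

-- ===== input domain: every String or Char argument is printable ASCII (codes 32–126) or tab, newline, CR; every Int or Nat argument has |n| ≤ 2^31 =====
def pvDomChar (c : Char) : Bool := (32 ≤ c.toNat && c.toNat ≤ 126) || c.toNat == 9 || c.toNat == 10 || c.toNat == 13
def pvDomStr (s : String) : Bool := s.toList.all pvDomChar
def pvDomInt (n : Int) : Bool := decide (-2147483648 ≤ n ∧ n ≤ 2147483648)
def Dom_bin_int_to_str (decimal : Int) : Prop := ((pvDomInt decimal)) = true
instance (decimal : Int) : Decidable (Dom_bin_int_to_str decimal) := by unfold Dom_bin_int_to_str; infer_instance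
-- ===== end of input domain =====

-- B uses a different algorithm: it first counts the digits, then extracts each digit
-- most-significant-first by dividing by powers of the base (no prepend accumulator); same result, similar cost.

-- ===== PORT A =====
-- base_digits as a list of characters (indexing is always in range 0..63, so pyGetD is exact)
def pvDigits : List Char :=
  "0123456789ABCDEFGHIJKLMNOPQRSTUVWXYZabcdefghijklmnopqrstuvwxyz_$".toList

-- the while-loop of A: state (decimal, base), prepending each digit
def pvLoopA (decimal : Int) (base : List Char) : List Char :=
  if _h : decimal > 0 then
    pvLoopA (PySem.Int.floordiv decimal 64)
      (PySem.List.pyGetD pvDigits (PySem.Int.mod decimal 64) ' ' :: base)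
  else base
termination_by decimal.toNat
decreasing_by
  rw [PySem.Int.floordiv_eq_ediv_of_pos (by omega : (0:Int) < 64)]
  omega

def bin_int_to_str (decimal : Int) : String :=
  if decimal = 0 then String.ofList [PySem.List.pyGetD pvDigits 0 ' ']
  else String.ofList (pvLoopA decimal [])

-- ===== PORT B =====
-- phase 1 of B: the digit-counting while-loop, state (v, n)
def pvCountB (v : Int) (n : Int) : Int :=
  if _h : v > 0 then pvCountB (PySem.Int.floordiv v 64) (n + 1) else n
termination_by v.toNat
decreasing_by
  rw [PySem.Int.floordiv_eq_ediv_of_pos (by omega : (0:Int) < 64)]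
  omega

-- phase 2 of B: the for-loop over range(n-1, -1, -1) appending base_digits[(decimal // 64**k) % 64]
-- (k is nonnegative throughout the range, so base_num ** k is ported as 64 ^ k.toNat)
def pvEmitB (decimal : Int) (ks : List Int) : List Char :=
  ks.foldl (fun out k =>
    out ++ [PySem.List.pyGetD pvDigits
      (PySem.Int.mod (PySem.Int.floordiv decimal ((64:Int) ^ k.toNat)) 64) ' ']) []

def bin_int_to_str_alt (decimal : Int) : String :=
  if decimal = 0 then String.ofList [PySem.List.pyGetD pvDigits 0 ' ']
  else String.ofList
    (pvEmitB decimal (PySem.List.pyRange (pvCountB decimal 0 - 1) (-1) (-1)))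

-- ===== PRECONDITION & SPEC =====
def Spec_bin_int_to_str (decimal : Int) (out : String) : Prop := out = bin_int_to_str_alt decimal
instance (decimal : Int) (out : String) : Decidable (Spec_bin_int_to_str decimal out) := by unfold Spec_bin_int_to_str; infer_instance

-- ===== CLAIM (what is proved, stated in full; the proofs are below) =====
def Claim_equal_bin_int_to_str : Prop := ∀ (decimal : Int), Dom_bin_int_to_str decimal → Spec_bin_int_to_str decimal (bin_int_to_str decimal)

-- ===== LEMMAS AND PROOFS =====

-- fold-append over a list is the initial list followed by the mapped list
theorem pvFoldl_append_eq_map {α β : Type} (f : α → β) (ks : List α) (init : List β) :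
    ks.foldl (fun out k => out ++ [f k]) init = init ++ ks.map f := by
  induction ks generalizing init with
  | nil => simp
  | cons k ks ih => simp [List.foldl, ih]

-- the digit B emits for exponent k
def pvDigitF (d k : Int) : Char :=
  PySem.List.pyGetD pvDigits
    (PySem.Int.mod (PySem.Int.floordiv d ((64:Int) ^ k.toNat)) 64) ' '

theorem pvEmitB_eq_map (d : Int) (ks : List Int) :
    pvEmitB d ks = ks.map (pvDigitF d) := by
  simpa [pvEmitB, pvDigitF] using pvFoldl_append_eq_map (pvDigitF d) ks []

-- counting with an accumulator
theorem pvCountB_acc (v : Int) : ∀ n : Int, pvCountB v n = n + pvCountB v 0 := by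
  by_cases h : v > 0
  · intro n
    conv_lhs => rw [pvCountB, dif_pos h, pvCountB_acc (PySem.Int.floordiv v 64) (n + 1)]
    conv_rhs => rw [pvCountB, dif_pos h, pvCountB_acc (PySem.Int.floordiv v 64) (0 + 1)]
    ring
  · intro n
    conv_lhs => rw [pvCountB, dif_neg h]
    conv_rhs => rw [pvCountB, dif_neg h]
    ring
termination_by v.toNat
decreasing_by
  all_goals rw [PySem.Int.floordiv_eq_ediv_of_pos (by omega : (0:Int) < 64)]; omega

theorem pvCountB_nonneg (v : Int) : 0 ≤ pvCountB v 0 := by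
  by_cases h : v > 0
  · rw [pvCountB, dif_pos h, pvCountB_acc]
    have := pvCountB_nonneg (PySem.Int.floordiv v 64)
    omega
  · rw [pvCountB, dif_neg h]
termination_by v.toNat
decreasing_by
  rw [PySem.Int.floordiv_eq_ediv_of_pos (by omega : (0:Int) < 64)]; omega

-- shifting digit exponents down one matches dividing the value by the base
theorem pvDigitF_shift (d k : Int) (hk : 1 ≤ k) :
    pvDigitF d k = pvDigitF (PySem.Int.floordiv d 64) (k - 1) := by
  unfold pvDigitF
  congr 1
  rw [PySem.Int.floordiv_eq_ediv_of_pos (by omega : (0:Int) < 64),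
      PySem.Int.floordiv_eq_ediv_of_pos (by positivity : (0:Int) < 64 ^ k.toNat),
      PySem.Int.floordiv_eq_ediv_of_pos (by positivity : (0:Int) < 64 ^ (k-1).toNat)]
  have hpow : (64:Int) ^ k.toNat = 64 * 64 ^ (k - 1).toNat := by
    have : k.toNat = (k - 1).toNat + 1 := by omega
    rw [this, pow_succ]; ring
  rw [hpow, ← Int.ediv_ediv_of_nonneg (by omega : (0:Int) ≤ 64)]

-- map over a countdown range shifted down by one
theorem pvMap_shift (m : Int) (f g : Int → Char)
    (hfg : ∀ k : Int, 1 ≤ k → f k = g (k - 1)) :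
    (PySem.List.pyRange m 0 (-1)).map f = (PySem.List.pyRange (m - 1) (-1) (-1)).map g := by
  by_cases h : m ≤ 0
  · rw [PySem.List.pyRange_neg_one_eq_nil h, PySem.List.pyRange_neg_one_eq_nil (by omega)]
    simp
  · rw [PySem.List.pyRange_neg_one_cons (by omega : (0:Int) < m),
        PySem.List.pyRange_neg_one_cons (by omega : (-1:Int) < m - 1)]
    simp only [List.map_cons]
    rw [hfg m (by omega), pvMap_shift (m - 1) f g hfg]
termination_by m.toNat
decreasing_by omega

-- splitting the trailing 0 off a countdown range down to -1
theorem pvRange_split_zero (m : Int) (hm : 0 ≤ m) :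
    PySem.List.pyRange m (-1) (-1) = PySem.List.pyRange m 0 (-1) ++ [0] := by
  by_cases h : m = 0
  · subst h
    rw [PySem.List.pyRange_neg_one_cons (by omega : (-1:Int) < 0),
        show (0:Int) - 1 = -1 from by omega,
        PySem.List.pyRange_neg_one_eq_nil (by omega : (-1:Int) ≤ -1),
        PySem.List.pyRange_neg_one_eq_nil (by omega : (0:Int) ≤ 0)]
    simp
  · rw [PySem.List.pyRange_neg_one_cons (by omega : (-1:Int) < m),
        PySem.List.pyRange_neg_one_cons (by omega : (0:Int) < m),
        pvRange_split_zero (m - 1) (by omega)]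
    simp
termination_by m.toNat
decreasing_by omega

-- main invariant: A's prepend loop produces exactly B's most-significant-first digits
theorem pvLoopA_eq (decimal : Int) (base : List Char) :
    pvLoopA decimal base =
      (PySem.List.pyRange (pvCountB decimal 0 - 1) (-1) (-1)).map (pvDigitF decimal) ++ base := by
  by_cases h : decimal > 0
  · rw [pvLoopA, dif_pos h,
        pvLoopA_eq (PySem.Int.floordiv decimal 64)]
    have hcnt : pvCountB decimal 0 = pvCountB (PySem.Int.floordiv decimal 64) 0 + 1 := by
      rw [pvCountB, dif_pos h, pvCountB_acc]; ring
    have hnn := pvCountB_nonneg (PySem.Int.floordiv decimal 64)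
    rw [hcnt]
    have hsplit := pvRange_split_zero (pvCountB (PySem.Int.floordiv decimal 64) 0 + 1 - 1) (by omega)
    rw [hsplit, List.map_append,
        pvMap_shift _ (pvDigitF decimal) (pvDigitF (PySem.Int.floordiv decimal 64))
          (fun k hk => pvDigitF_shift decimal k hk)]
    have h0 : pvDigitF decimal 0 = PySem.List.pyGetD pvDigits (PySem.Int.mod decimal 64) ' ' := by
      unfold pvDigitF
      rw [show ((64:Int) ^ (Int.toNat 0)) = 1 from by norm_num,
          PySem.Int.floordiv_eq_ediv_of_pos (by omega : (0:Int) < 1), Int.ediv_one]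
    simp [h0]
  · rw [pvLoopA, dif_neg h, pvCountB, dif_neg h,
        PySem.List.pyRange_neg_one_eq_nil (by omega : (0:Int) - 1 ≤ -1)]
    simp
termination_by decimal.toNat
decreasing_by
  rw [PySem.Int.floordiv_eq_ediv_of_pos (by omega : (0:Int) < 64)]
  omega

-- ===== VERDICT (by name: the statement is the Claim_ definition above) =====
theorem bin_int_to_str_spec : Claim_equal_bin_int_to_str := by
  intro decimal _
  unfold Spec_bin_int_to_str bin_int_to_str bin_int_to_str_alt
  by_cases h : decimal = 0
  · simp [h]
  · simp [h, pvLoopA_eq, pvEmitB_eq_map]
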